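-- pv_equiv track=rewrite | github.com/zhangtianqi-james/SecOpsTM | threat_analysis/iac_plugins/terraform_plugin.py | _extract_block_body
-- ===== SOURCE A (Python) =====
-- def _extract_block_body(hcl_text: str, open_brace_pos: int) -> str:
--     """Return the text inside the outermost braces starting at *open_brace_pos*."""
--     depth = 0
--     start = open_brace_pos
--     for i in range(start, len(hcl_text)):
--         ch = hcl_text[i]
--         if ch == "{":
--             depth += 1
--         elif ch == "}":
--             depth -= 1
--             if depth == 0:
--                 return hcl_text[start + 1 : i]
--     return hcl_text[start + 1 :]
-- ===== SOURCE B (Python) =====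
-- def _extract_block_body(hcl_text: str, open_brace_pos: int) -> str:
--     """Return the text inside the outermost braces starting at *open_brace_pos*."""
--     # Stage 1: brace deltas of the text from open_brace_pos on.
--     deltas = [(c == "{") - (c == "}") for c in hcl_text[open_brace_pos:]]
--     # Stage 2: materialise the full depth profile (prefix sums of the deltas).
--     depths = []
--     total = 0
--     for x in deltas:
--         total += x
--         depths.append(total)
--     # Stage 3: the body ends at the first '}' whose depth profile value is 0.
--     for k, (x, dep) in enumerate(zip(deltas, depths)):
--         if x == -1 and dep == 0:
--             return hcl_text[open_brace_pos + 1 : open_brace_pos + k]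
--     return hcl_text[open_brace_pos + 1 :]
-- ===== Notes on version B (the rewrite author's own statement) =====
-- stated objective: alternative
-- what changed: Replaces A's single fused scan with a running counter and early return by three staged passes: map characters to brace deltas, materialise the full prefix-sum depth profile as a list, then search that profile for the first '}' whose depth is zero.
-- outside the precondition, e.g. on _extract_block_body('}{{', -3): A returns '', B returns '{{'; on _extract_block_body('a', -3): A raises IndexError, B returns 'a'
import Mathlib
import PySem

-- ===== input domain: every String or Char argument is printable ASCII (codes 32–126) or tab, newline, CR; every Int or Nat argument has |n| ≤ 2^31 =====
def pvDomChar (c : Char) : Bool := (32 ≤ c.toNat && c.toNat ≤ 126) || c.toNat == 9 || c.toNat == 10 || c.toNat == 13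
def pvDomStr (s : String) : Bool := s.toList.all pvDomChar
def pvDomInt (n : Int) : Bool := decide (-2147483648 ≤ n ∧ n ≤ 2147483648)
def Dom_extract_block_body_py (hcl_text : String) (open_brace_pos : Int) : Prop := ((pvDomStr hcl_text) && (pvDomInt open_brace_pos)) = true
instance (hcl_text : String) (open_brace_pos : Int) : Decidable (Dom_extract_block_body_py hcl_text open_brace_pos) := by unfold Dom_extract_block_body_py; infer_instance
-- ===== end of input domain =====

-- B replaces A's fused scan-with-early-return by staged passes: brace deltas, the materialised depth profile, then a search of it.

-- ===== PORT A =====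
-- A's for-loop over range(start, len): returns the index of the depth-closing '}', or none
def pvALoop (cs : List Char) (idxs : List Int) (depth : Int) : Option Int :=
  match idxs with
  | [] => none
  | i :: rest =>
    let ch := PySem.List.pyGetD cs i ' '   -- hcl_text[i]; in range for every index of the loop whenever Pre_ holds
    if ch = '{' then pvALoop cs rest (depth + 1)
    else if ch = '}' then
      if depth - 1 = 0 then some i else pvALoop cs rest (depth - 1)
    else pvALoop cs rest depth

def extract_block_body_py (hcl_text : String) (open_brace_pos : Int) : String :=
  let cs := hcl_text.toList
  match pvALoop cs (PySem.List.pyRange open_brace_pos (cs.length : Int) 1) 0 with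
  | some i => String.ofList (PySem.List.slice cs (some (open_brace_pos + 1)) (some i))   -- hcl_text[start+1:i]
  | none => String.ofList (PySem.List.slice cs (some (open_brace_pos + 1)) none)         -- hcl_text[start+1:]

-- ===== PORT B =====
-- stage 2: the loop materialising the prefix sums of the deltas
def pvDepthsLoop (ds : List Int) (total : Int) : List Int :=
  match ds with
  | [] => []
  | x :: r => (total + x) :: pvDepthsLoop r (total + x)

-- stage 3: the search loop over enumerate(zip(deltas, depths))
def pvFindClose (ps : List (Int × Int)) (k : Nat) : Option Nat :=
  match ps with
  | [] => none
  | (x, dep) :: r => if x = -1 ∧ dep = 0 then some k else pvFindClose r (k + 1)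

def extract_block_body_py_alt (hcl_text : String) (open_brace_pos : Int) : String :=
  let cs := hcl_text.toList
  -- stage 1: deltas of hcl_text[open_brace_pos:]  ((c == "{") - (c == "}"))
  let deltas := (PySem.List.slice cs (some open_brace_pos) none).map
      (fun c => (if c = '{' then (1 : Int) else 0) - (if c = '}' then 1 else 0))
  let depths := pvDepthsLoop deltas 0
  match pvFindClose (deltas.zip depths) 0 with
  | some k => String.ofList (PySem.List.slice cs (some (open_brace_pos + 1)) (some (open_brace_pos + (k : Int))))
  | none => String.ofList (PySem.List.slice cs (some (open_brace_pos + 1)) none)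

-- ===== PRECONDITION & SPEC =====
-- Pre_ excludes negative open_brace_pos: there A raises IndexError (when open_brace_pos < -len) or
-- returns a value produced by accidental negative-index wraparound (the wrapped prefix is scanned twice), which B
-- (a profile of the slice from that position) does not reproduce.
def Pre_extract_block_body_py (hcl_text : String) (open_brace_pos : Int) : Prop := 0 ≤ open_brace_pos
instance (hcl_text : String) (open_brace_pos : Int) : Decidable (Pre_extract_block_body_py hcl_text open_brace_pos) := by unfold Pre_extract_block_body_py; infer_instance
def pvWitness_extract_block_body_py : String × Int := ("a{b{c}d}e", 1)
def Spec_extract_block_body_py (hcl_text : String) (open_brace_pos : Int) (out : String) : Prop := out = extract_block_body_py_alt hcl_text open_brace_pos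
instance (hcl_text : String) (open_brace_pos : Int) (out : String) : Decidable (Spec_extract_block_body_py hcl_text open_brace_pos out) := by unfold Spec_extract_block_body_py; infer_instance

-- ===== CLAIM (what is proved, stated in full; the proofs are below) =====
def Claim_equal_extract_block_body_py : Prop := ∀ (hcl_text : String) (open_brace_pos : Int), Dom_extract_block_body_py hcl_text open_brace_pos → Pre_extract_block_body_py hcl_text open_brace_pos → Spec_extract_block_body_py hcl_text open_brace_pos (extract_block_body_py hcl_text open_brace_pos)

-- ===== LEMMAS AND PROOFS =====

-- the delta of one character, as B's stage 1 computes it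
def pvDelta (c : Char) : Int := (if c = '{' then 1 else 0) - (if c = '}' then 1 else 0)

-- B's stages 2–3 on a suffix, starting from depth d
def pvSearch (t : List Char) (d : Int) : Option Nat :=
  pvFindClose ((t.map pvDelta).zip (pvDepthsLoop (t.map pvDelta) d)) 0

lemma pvFindClose_succ (ps : List (Int × Int)) (k : Nat) :
    pvFindClose ps (k + 1) = Option.map (· + 1) (pvFindClose ps k) := by
  induction ps generalizing k with
  | nil => rfl
  | cons p r ih =>
    obtain ⟨x, dep⟩ := p
    simp only [pvFindClose]
    split_ifs with h
    · rfl
    · exact ih (k + 1)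

lemma pvSearch_cons (c : Char) (t : List Char) (d : Int) :
    pvSearch (c :: t) d =
      if c = '{' then Option.map (· + 1) (pvSearch t (d + 1))
      else if c = '}' then
        (if d - 1 = 0 then some 0 else Option.map (· + 1) (pvSearch t (d - 1)))
      else Option.map (· + 1) (pvSearch t d) := by
  by_cases hob : c = '{'
  · subst hob
    simp only [pvSearch, List.map_cons, pvDepthsLoop, List.zip_cons_cons, pvFindClose,
      show pvDelta '{' = 1 by decide]
    norm_num
    rw [pvFindClose_succ]
  · by_cases hcb : c = '}'
    · subst hcb
      simp only [pvSearch, List.map_cons, pvDepthsLoop, List.zip_cons_cons, pvFindClose,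
        show pvDelta '}' = -1 by decide]
      norm_num [hob]
      by_cases hd : d - 1 = 0
      · rw [if_pos (by omega), if_pos hd]
      · rw [if_neg (by omega), if_neg hd, pvFindClose_succ, show d + -1 = d - 1 by omega]
    · have hz : pvDelta c = 0 := by simp [pvDelta, hob, hcb]
      simp only [pvSearch, List.map_cons, pvDepthsLoop, List.zip_cons_cons, pvFindClose, hz]
      norm_num [hob, hcb, pvFindClose_succ]

-- A's fused scan from index j equals B's staged search over the suffix from j
lemma pvLoop_eq_search (k : Nat) : ∀ (cs : List Char) (j : Nat) (d : Int), cs.length - j = k →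
    pvALoop cs (PySem.List.pyRange (j : Int) (cs.length : Int) 1) d
      = Option.map (fun m : Nat => (j : Int) + (m : Int)) (pvSearch (cs.drop j) d) := by
  induction k with
  | zero =>
    intro cs j d hk
    have hj : cs.length ≤ j := by omega
    rw [List.drop_eq_nil_of_le hj, PySem.List.pyRange_one_eq_nil (by exact_mod_cast hj)]
    rfl
  | succ k ih =>
    intro cs j d hk
    have hj : j < cs.length := by omega
    rw [PySem.List.pyRange_one_cons (by exact_mod_cast hj)]
    rw [List.drop_eq_getElem_cons hj]
    have hget : PySem.List.pyGetD cs (j : Int) ' ' = cs[j] := by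
      rw [PySem.List.pyGetD_natCast, List.getD_eq_getElem cs ' ' hj]
    have ihrec : ∀ d', pvALoop cs (PySem.List.pyRange ((j : Int) + 1) (cs.length : Int) 1) d'
        = Option.map (fun m : Nat => ((j : Int) + 1) + (m : Int)) (pvSearch (cs.drop (j + 1)) d') := by
      intro d'
      have hsucc : ((j : Int) + 1) = ((j + 1 : Nat) : Int) := by push_cast; ring
      rw [hsucc, ih cs (j + 1) d' (by omega)]
    have hmap : ∀ (o : Option Nat) (z : Int),
        Option.map (fun m : Nat => z + (m : Int)) (Option.map (· + 1) o)
          = Option.map (fun m : Nat => (z + 1) + (m : Int)) o := by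
      intro o z
      cases o with
      | none => rfl
      | some m => simp; push_cast; ring
    have hshift : ∀ (o : Option Nat) (z : Int),
        Option.map (fun m : Nat => (z + 1) + (m : Int)) o
          = Option.map ((fun m : Nat => z + (m : Int)) ∘ fun x => x + 1) o := by
      intro o z
      cases o with
      | none => rfl
      | some m => simp [Function.comp]; ring
    rw [pvSearch_cons]
    by_cases hob : cs[j] = '{'
    · simp only [pvALoop, hget, hob]
      norm_num
      rw [ihrec (d + 1)]
      exact hshift _ _
    · by_cases hcb : cs[j] = '}'
      · simp only [pvALoop, hget, hcb]
        norm_num [hob, show (('}' : Char) = '{') = False by decide]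
        by_cases hd : d - 1 = 0
        · rw [if_pos hd, if_pos hd]
          simp
        · rw [if_neg hd, if_neg hd, ihrec (d - 1), hmap]
      · simp only [pvALoop, hget]
        rw [if_neg hob, if_neg hcb, if_neg hob, if_neg hcb, ihrec d, hmap]

-- B's port with its inline stage-1 lambda folded into pvSearch (definitional)
lemma pvAlt_eq_search (hcl_text : String) (j : Nat) :
    extract_block_body_py_alt hcl_text (j : Int) =
      match pvSearch (hcl_text.toList.drop j) 0 with
      | some k => String.ofList (PySem.List.slice hcl_text.toList (some ((j : Int) + 1)) (some ((j : Int) + (k : Int))))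
      | none => String.ofList (PySem.List.slice hcl_text.toList (some ((j : Int) + 1)) none) := by
  simp only [extract_block_body_py_alt, PySem.List.slice_from_natCast]
  rfl

-- ===== VERDICT (by name: the statement is the Claim_ definition above) =====
theorem extract_block_body_py_spec : Claim_equal_extract_block_body_py := by
  intro hcl_text open_brace_pos _ hpre
  unfold Pre_extract_block_body_py at hpre
  unfold Spec_extract_block_body_py
  obtain ⟨j, rfl⟩ : ∃ j : Nat, open_brace_pos = (j : Int) := ⟨open_brace_pos.toNat, by omega⟩
  rw [pvAlt_eq_search]
  simp only [extract_block_body_py]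
  rw [pvLoop_eq_search (hcl_text.toList.length - j) hcl_text.toList j 0 rfl]
  cases hs : pvSearch (hcl_text.toList.drop j) 0 with
  | none => simp
  | some m => simp
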